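-- pv_equiv track=rewrite | github.com/Ismael1320/IA_P2 |  Algoritmos_Genéticos/Satisfacción_de_Restricciones/23Acondicionamiento_del_Corte.py | cutset_conditioning
-- ===== SOURCE A (Python) =====
-- def es_valido(nodo, color, asignacion, grafo):
--     for vecino in grafo[nodo]:
--         if vecino in asignacion and asignacion[vecino] == color:
--             return False
--     return True
--
-- def resolver_arbol(asignacion, grafo, colores):
--
--     if len(asignacion) == len(grafo):
--         return asignacion
--
--     nodo = next(n for n in grafo if n not in asignacion)
--
--     for color in colores:
--         if es_valido(nodo, color, asignacion, grafo):
--             asignacion[nodo] = color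
--             resultado = resolver_arbol(asignacion, grafo, colores)
--             if resultado:
--                 return resultado
--             del asignacion[nodo]
--
--     return None
--
-- def cutset_conditioning(grafo, colores, cutset):
--     from itertools import product
--
--
--     for combinacion in product(colores, repeat=len(cutset)):
--         asignacion = {}
--
--         valido = True
--         for nodo, color in zip(cutset, combinacion):
--             if es_valido(nodo, color, asignacion, grafo):
--                 asignacion[nodo] = color
--             else:
--                 valido = False
--                 break
--
--         if not valido:
--             continue
--
--         resultado = resolver_arbol(asignacion, grafo, colores)
--         if resultado:
--             return resultado
--
--     return None
-- ===== SOURCE B (Python) =====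
-- def cutset_conditioning(grafo, colores, cutset):
--     # One unified recursive backtracker: cutset positions first (pruning whole
--     # invalid prefixes instead of re-seeding every product combination), then
--     # the remaining nodes in graph order; assignments are passed functionally.
--
--     def ok(asig, nodo, color):
--         return all(asig.get(v) != color for v in grafo[nodo])
--
--     def solve_tree(restantes, asig):
--         if not restantes:
--             return asig
--         nodo, resto = restantes[0], restantes[1:]
--         for color in colores:
--             if ok(asig, nodo, color):
--                 res = solve_tree(resto, {**asig, nodo: color})
--                 if res is not None:
--                     return res
--         return None
--
--     def solve_cutset(pendientes, asig):
--         if not pendientes: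
--             return solve_tree([n for n in grafo if n not in asig], asig)
--         nodo, resto = pendientes[0], pendientes[1:]
--         for color in colores:
--             if ok(asig, nodo, color):
--                 res = solve_cutset(resto, {**asig, nodo: color})
--                 if res is not None:
--                     return res
--         return None
--
--     return solve_cutset(list(cutset), {})
-- ===== Notes on version B (the rewrite author's own statement) =====
-- stated objective: alternative
-- what changed: A enumerates all len(colores)^len(cutset) product combinations, re-seeding each from scratch, and its tree solver rescans the whole graph for the next unassigned node at every call; B is a single unified recursive backtracker over cutset positions then the remaining nodes in graph order, pruning an invalid cutset prefix once instead of re-seeding every combination sharing it, with the tree node order precomputed once.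
-- intended difference: On the empty graph with empty cutset A returns None (the correct empty assignment {} is falsy in A's 'if resultado:' test) while B returns the empty assignment {}, the intended colouring of the empty graph. — e.g. on cutset_conditioning([], ["red"], []): A returns none, B returns some []
import Mathlib
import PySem

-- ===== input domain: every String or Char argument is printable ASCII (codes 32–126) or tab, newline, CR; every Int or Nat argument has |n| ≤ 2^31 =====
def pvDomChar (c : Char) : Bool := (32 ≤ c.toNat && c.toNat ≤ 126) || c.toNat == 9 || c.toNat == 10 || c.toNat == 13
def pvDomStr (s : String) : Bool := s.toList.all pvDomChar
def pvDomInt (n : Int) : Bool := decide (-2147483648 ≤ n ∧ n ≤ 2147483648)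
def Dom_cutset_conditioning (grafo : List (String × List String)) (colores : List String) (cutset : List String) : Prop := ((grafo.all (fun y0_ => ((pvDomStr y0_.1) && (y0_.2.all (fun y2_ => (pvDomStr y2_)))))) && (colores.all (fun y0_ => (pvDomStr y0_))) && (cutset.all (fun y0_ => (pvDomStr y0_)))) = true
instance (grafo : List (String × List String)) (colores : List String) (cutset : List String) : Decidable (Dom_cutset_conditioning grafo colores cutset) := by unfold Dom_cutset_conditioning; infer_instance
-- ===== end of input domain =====

-- B replaces A's product-over-all-cutset-combinations loop plus recursive tree solver by one
-- unified recursive backtracker (cutset positions first, then remaining nodes in graph order),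
-- pruning invalid cutset prefixes once instead of re-seeding them per combination.
-- Return-value equivalence only: A mutates and returns its internal dict, B builds fresh dicts.

-- ===== PORT A =====
-- the Python dict grafo, built from the association list (last duplicate key wins, first position kept)
def pvToDict (grafo : List (String × List String)) : PySem.Dict String (List String) :=
  grafo.foldl (fun d kv => d.insert kv.1 kv.2) PySem.Dict.empty

-- es_valido: loop over grafo[nodo]'s neighbours; 'vecino in asignacion and asignacion[vecino] == color'
def pvValidoLoop (vecinos : List String) (color : String) (asig : PySem.Dict String String) : Bool :=
  match vecinos with
  | [] => true
  | v :: rest => if asig.get? v = some color then false else pvValidoLoop rest color asig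

def esValido (nodo color : String) (asig : PySem.Dict String String)
    (d : PySem.Dict String (List String)) : Bool :=
  match d.get? nodo with
  | none => true   -- Python raises KeyError here; unreachable under Pre_
  | some vecinos => pvValidoLoop vecinos color asig

-- resolver_arbol, with fuel for the recursion depth (fuel = |grafo| + 1 always suffices under Pre_)
mutual
def resolverArbol (d : PySem.Dict String (List String)) (colores : List String) :
    Nat → PySem.Dict String String → Option (PySem.Dict String String)
  | 0, _ => none   -- fuel exhausted; unreachable under Pre_ with the fuel supplied below
  | fuel + 1, asig =>
    if asig.size = d.size then some asig
    else
      match d.keys.find? (fun n => !asig.contains n) with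
      | none => none   -- Python raises StopIteration; unreachable under Pre_
      | some nodo => resolverColores d colores fuel nodo colores asig
termination_by fuel _ => (fuel, 0)

def resolverColores (d : PySem.Dict String (List String)) (colores : List String) :
    Nat → String → List String → PySem.Dict String String → Option (PySem.Dict String String)
  | _, _, [], _ => none
  | fuel, nodo, color :: rest, asig =>
    if esValido nodo color asig d then
      match resolverArbol d colores fuel (asig.insert nodo color) with
      | some r => if r.size ≠ 0 then some r else resolverColores d colores fuel nodo rest asig
      | none => resolverColores d colores fuel nodo rest asig
    else resolverColores d colores fuel nodo rest asig
termination_by fuel _ cols _ => (fuel, cols.length + 1)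
end

-- list(itertools.product(colores, repeat=n)) in lexicographic order
def pvProd (colores : List String) : Nat → List (List String)
  | 0 => [[]]
  | n + 1 => colores.flatMap (fun c => (pvProd colores n).map (c :: ·))

-- the seeding loop 'for nodo, color in zip(cutset, combinacion)' with the valido flag/break
def pvSeed (d : PySem.Dict String (List String)) :
    List (String × String) → PySem.Dict String String → Option (PySem.Dict String String)
  | [], asig => some asig
  | (nodo, color) :: rest, asig =>
    if esValido nodo color asig d then pvSeed d rest (asig.insert nodo color) else none

-- the outer 'for combinacion in product(...)' loop
def pvOuter (d : PySem.Dict String (List String)) (colores : List String) (cutset : List String) :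
    List (List String) → Option (PySem.Dict String String)
  | [] => none
  | comb :: rest =>
    match pvSeed d (cutset.zip comb) PySem.Dict.empty with
    | none => pvOuter d colores cutset rest
    | some asig =>
      match resolverArbol d colores (d.size + 1) asig with
      | some r => if r.size ≠ 0 then some r else pvOuter d colores cutset rest
      | none => pvOuter d colores cutset rest

def cutset_conditioning (grafo : List (String × List String)) (colores : List String)
    (cutset : List String) : Option (List (String × String)) :=
  let d := pvToDict grafo
  (pvOuter d colores cutset (pvProd colores cutset.length)).map (·.items)

-- ===== PORT B =====
-- ok: all(asig.get(v) != color for v in grafo[nodo])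
def pvOk (d : PySem.Dict String (List String)) (asig : PySem.Dict String String)
    (nodo color : String) : Bool :=
  match d.get? nodo with
  | none => true   -- Python raises KeyError here; unreachable under Pre_
  | some vs => vs.all (fun v => !(asig.get? v == some color))

mutual
def pvSolveTree (d : PySem.Dict String (List String)) (colores : List String) :
    List String → PySem.Dict String String → Option (PySem.Dict String String)
  | [], asig => some asig
  | nodo :: resto, asig => pvTreeCols d colores nodo resto colores asig
termination_by rem _ => (rem.length + 1, 0)

def pvTreeCols (d : PySem.Dict String (List String)) (colores : List String) :
    String → List String → List String → PySem.Dict String String → Option (PySem.Dict String String)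
  | _, _, [], _ => none
  | nodo, resto, color :: cs, asig =>
    if pvOk d asig nodo color then
      match pvSolveTree d colores resto (asig.insert nodo color) with
      | some r => some r
      | none => pvTreeCols d colores nodo resto cs asig
    else pvTreeCols d colores nodo resto cs asig
termination_by _ resto cols _ => (resto.length + 1, cols.length + 1)
end

mutual
def pvSolveCutset (d : PySem.Dict String (List String)) (colores : List String) :
    List String → PySem.Dict String String → Option (PySem.Dict String String)
  | [], asig => pvSolveTree d colores (d.keys.filter (fun n => !asig.contains n)) asig
  | nodo :: resto, asig => pvCutCols d colores nodo resto colores asig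
termination_by pend _ => (pend.length + 1, 0)

def pvCutCols (d : PySem.Dict String (List String)) (colores : List String) :
    String → List String → List String → PySem.Dict String String → Option (PySem.Dict String String)
  | _, _, [], _ => none
  | nodo, resto, color :: cs, asig =>
    if pvOk d asig nodo color then
      match pvSolveCutset d colores resto (asig.insert nodo color) with
      | some r => some r
      | none => pvCutCols d colores nodo resto cs asig
    else pvCutCols d colores nodo resto cs asig
termination_by _ resto cols _ => (resto.length + 1, cols.length + 1)
end

def cutset_conditioning_alt (grafo : List (String × List String)) (colores : List String)
    (cutset : List String) : Option (List (String × String)) :=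
  let d := pvToDict grafo
  (pvSolveCutset d colores cutset PySem.Dict.empty).map (·.items)

-- ===== PRECONDITION & SPEC =====
-- Pre_ excludes exactly the inputs where A raises KeyError: a cutset node missing from the
-- graph while there is at least one colour (with no colours the seeding loop never runs).
def Pre_cutset_conditioning (grafo : List (String × List String)) (colores : List String) (cutset : List String) : Prop :=
  (∀ c ∈ cutset, c ∈ grafo.map Prod.fst) ∨ colores = []
instance (grafo : List (String × List String)) (colores : List String) (cutset : List String) : Decidable (Pre_cutset_conditioning grafo colores cutset) := by unfold Pre_cutset_conditioning; infer_instance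

def pvWitness_cutset_conditioning : (List (String × List String)) × List String × List String :=
  ([("a", ["b"]), ("b", ["a"]), ("c", [])], ["red", "blue"], ["a"])

-- On the empty graph with empty cutset A returns None — the correct empty assignment {} is falsy
-- in A's 'if resultado:' test — while B returns the empty assignment, the intended colouring.
def D_cutset_conditioning (grafo : List (String × List String)) (colores : List String) (cutset : List String) : Prop :=
  grafo = [] ∧ cutset = []
instance (grafo : List (String × List String)) (colores : List String) (cutset : List String) : Decidable (D_cutset_conditioning grafo colores cutset) := by unfold D_cutset_conditioning; infer_instance

def Spec_cutset_conditioning (grafo : List (String × List String)) (colores : List String) (cutset : List String) (out : Option (List (String × String))) : Prop := ¬ D_cutset_conditioning grafo colores cutset → out = cutset_conditioning_alt grafo colores cutset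
instance (grafo : List (String × List String)) (colores : List String) (cutset : List String) (out : Option (List (String × String))) : Decidable (Spec_cutset_conditioning grafo colores cutset out) := by unfold Spec_cutset_conditioning; infer_instance

def pvDiffWitness_cutset_conditioning : (List (String × List String)) × List String × List String :=
  ([], ["red"], [])
def pvDiffWitnessOut_cutset_conditioning : (Option (List (String × String))) × (Option (List (String × String))) :=
  (none, some [])

-- ===== CLAIM (what is proved, stated in full; the proofs are below) =====
def Claim_unchanged_cutset_conditioning : Prop := ∀ (grafo : List (String × List String)) (colores : List String) (cutset : List String), Dom_cutset_conditioning grafo colores cutset → Pre_cutset_conditioning grafo colores cutset → Spec_cutset_conditioning grafo colores cutset (cutset_conditioning grafo colores cutset)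
def Claim_changed_cutset_conditioning : Prop := Dom_cutset_conditioning (pvDiffWitness_cutset_conditioning.1) (pvDiffWitness_cutset_conditioning.2.1) (pvDiffWitness_cutset_conditioning.2.2) ∧ Pre_cutset_conditioning (pvDiffWitness_cutset_conditioning.1) (pvDiffWitness_cutset_conditioning.2.1) (pvDiffWitness_cutset_conditioning.2.2) ∧ D_cutset_conditioning (pvDiffWitness_cutset_conditioning.1) (pvDiffWitness_cutset_conditioning.2.1) (pvDiffWitness_cutset_conditioning.2.2) ∧ cutset_conditioning (pvDiffWitness_cutset_conditioning.1) (pvDiffWitness_cutset_conditioning.2.1) (pvDiffWitness_cutset_conditioning.2.2) = pvDiffWitnessOut_cutset_conditioning.1 ∧ cutset_conditioning_alt (pvDiffWitness_cutset_conditioning.1) (pvDiffWitness_cutset_conditioning.2.1) (pvDiffWitness_cutset_conditioning.2.2) = pvDiffWitnessOut_cutset_conditioning.2 ∧ pvDiffWitnessOut_cutset_conditioning.1 ≠ pvDiffWitnessOut_cutset_conditioning.2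
def Claim_exact_cutset_conditioning : Prop := ∀ (grafo : List (String × List String)) (colores : List String) (cutset : List String), Dom_cutset_conditioning grafo colores cutset → Pre_cutset_conditioning grafo colores cutset → D_cutset_conditioning grafo colores cutset → cutset_conditioning grafo colores cutset ≠ cutset_conditioning_alt grafo colores cutset

-- ===== LEMMAS AND PROOFS =====

-- generalized form of A's outer loop: the cutset suffix and the seed assignment are parameters
def pvAux (d : PySem.Dict String (List String)) (colores : List String) (cs : List String) :
    List (List String) → PySem.Dict String String → Option (PySem.Dict String String)
  | [], _ => none
  | comb :: rest, asig =>
    match pvSeed d (cs.zip comb) asig with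
    | none => pvAux d colores cs rest asig
    | some a =>
      match resolverArbol d colores (d.size + 1) a with
      | some r => if r.size ≠ 0 then some r else pvAux d colores cs rest asig
      | none => pvAux d colores cs rest asig

theorem pv_keys_length {κ ν : Type} (d : PySem.Dict κ ν) : d.keys.length = d.size := by
  simp [PySem.Dict.keys, PySem.Dict.size]

theorem pv_length_le (l m : List String) (h : l.Nodup) (hs : ∀ x ∈ l, x ∈ m) :
    l.length ≤ m.length := by
  calc l.length = l.toFinset.card := (List.toFinset_card_of_nodup h).symm
    _ ≤ m.toFinset.card := Finset.card_le_card (fun x hx => by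
        simp only [List.mem_toFinset] at *; exact hs x hx)
    _ ≤ m.length := m.toFinset_card_le

theorem pv_mem_of_len_ge (l m : List String) (h : l.Nodup) (hm : m.Nodup)
    (hs : ∀ x ∈ l, x ∈ m) (hl : m.length ≤ l.length) (x : String) (hx : x ∈ m) : x ∈ l := by
  have h1 : l.toFinset ⊆ m.toFinset := fun y hy => by
    simp only [List.mem_toFinset] at *; exact hs y hy
  have h2 : m.toFinset.card ≤ l.toFinset.card := by
    rw [List.toFinset_card_of_nodup h, List.toFinset_card_of_nodup hm]; exact hl
  have := Finset.eq_of_subset_of_card_le h1 h2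
  rw [← List.mem_toFinset, ← this, List.mem_toFinset] at hx; exact hx

-- A's neighbour loop is B's 'all' comprehension
theorem pv_VL (vs : List String) (color : String) (asig : PySem.Dict String String) :
    pvValidoLoop vs color asig = vs.all (fun v => !(asig.get? v == some color)) := by
  induction vs with
  | nil => rfl
  | cons v rest ih =>
    by_cases h : asig.get? v = some color <;> simp [pvValidoLoop, h, ih]

theorem pv_V (n c : String) (asig : PySem.Dict String String)
    (d : PySem.Dict String (List String)) : esValido n c asig d = pvOk d asig n c := by
  unfold esValido pvOk
  cases d.get? n with
  | none => rfl
  | some vs => exact pv_VL vs c asig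

-- any assignment A's tree solver returns is a full assignment
theorem pv_S (d : PySem.Dict String (List String)) (colores : List String) :
    ∀ (fuel : Nat) (asig r : PySem.Dict String String),
      resolverArbol d colores fuel asig = some r → r.size = d.size := by
  intro fuel
  induction fuel with
  | zero => intro asig r h; simp [resolverArbol] at h
  | succ f ih =>
    have aux : ∀ (nodo : String) (cols : List String) (asig r : PySem.Dict String String),
        resolverColores d colores f nodo cols asig = some r → r.size = d.size := by
      intro nodo cols
      induction cols with
      | nil => intro asig r h; simp [resolverColores] at h
      | cons color rest ihc =>
        intro asig r h
        rw [resolverColores] at h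
        by_cases hv : esValido nodo color asig d
        · rw [if_pos hv] at h
          cases hra : resolverArbol d colores f (asig.insert nodo color) with
          | none => rw [hra] at h; exact ihc asig r h
          | some r' =>
            rw [hra] at h
            by_cases hr' : r'.size = 0
            · simp only [hr', ne_eq, not_true_eq_false, if_false] at h
              exact ihc asig r h
            · simp only [ne_eq, hr', not_false_eq_true, if_true, Option.some.injEq] at h
              subst h; exact ih _ _ hra
        · rw [if_neg hv] at h; exact ihc asig r h
    intro asig r h
    rw [resolverArbol] at h
    by_cases hsz : asig.size = d.size
    · rw [if_pos hsz] at h; cases h; exact hsz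
    · rw [if_neg hsz] at h
      cases hfind : d.keys.find? (fun n => !asig.contains n) with
      | none => rw [hfind] at h; cases h
      | some nodo => rw [hfind] at h; exact aux nodo colores asig r h

theorem pv_T (d : PySem.Dict String (List String)) (colores : List String)
    (hd : d.keys.Nodup) :
    ∀ (fuel : Nat) (asig : PySem.Dict String String), asig.keys.Nodup →
      (∀ k ∈ asig.keys, k ∈ d.keys) → d.size - asig.size < fuel →
      resolverArbol d colores fuel asig
        = pvSolveTree d colores (d.keys.filter (fun n => !asig.contains n)) asig := by
  intro fuel
  induction fuel with
  | zero => intro asig _ _ hf; exact absurd hf (Nat.not_lt_zero _)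
  | succ f ih =>
    intro asig hnd hsub hf
    have hle : asig.size ≤ d.size := by
      rw [← pv_keys_length, ← pv_keys_length]; exact pv_length_le _ _ hnd hsub
    by_cases hsz : asig.size = d.size
    · have hfilter : d.keys.filter (fun n => !asig.contains n) = [] := by
        rw [List.filter_eq_nil_iff]
        intro n hn
        have hmem : n ∈ asig.keys :=
          pv_mem_of_len_ge asig.keys d.keys hnd hd hsub
            (by rw [pv_keys_length, pv_keys_length]; omega) n hn
        have hc : asig.contains n = true := (PySem.Dict.contains_iff_mem_keys asig n).mpr hmem
        simp [hc]
      rw [resolverArbol, if_pos hsz, hfilter, pvSolveTree]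
    · have hlt : asig.size < d.size := lt_of_le_of_ne hle hsz
      have hremne : d.keys.filter (fun n => !asig.contains n) ≠ [] := by
        intro hnil
        rw [List.filter_eq_nil_iff] at hnil
        have hsub' : ∀ n ∈ d.keys, n ∈ asig.keys := by
          intro n hn
          have := hnil n hn
          rw [← PySem.Dict.contains_iff_mem_keys]
          revert this
          cases asig.contains n <;> simp
        have := pv_length_le d.keys asig.keys hd hsub'
        rw [pv_keys_length, pv_keys_length] at this
        omega
      obtain ⟨nodo, rem', hcons⟩ := List.exists_cons_of_ne_nil hremne
      have hfind : d.keys.find? (fun n => !asig.contains n) = some nodo := by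
        rw [← List.head?_filter, hcons]; rfl
      have hnodo_rem : nodo ∈ d.keys.filter (fun n => !asig.contains n) := by
        rw [hcons]; exact List.mem_cons_self ..
      have hnodo_mem : nodo ∈ d.keys := (List.mem_filter.mp hnodo_rem).1
      have hnodo_nc : asig.contains nodo = false := by
        have := (List.mem_filter.mp hnodo_rem).2
        revert this; cases asig.contains nodo <;> simp
      have hnd_rem : (d.keys.filter (fun n => !asig.contains n)).Nodup := hd.filter _
      have hnop : nodo ∉ rem' := by
        rw [hcons] at hnd_rem; exact (List.nodup_cons.mp hnd_rem).1
      rw [resolverArbol, if_neg hsz, hfind, hcons, pvSolveTree]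
      suffices inner : ∀ cols : List String,
          resolverColores d colores f nodo cols asig
            = pvTreeCols d colores nodo rem' cols asig from inner colores
      intro cols
      induction cols with
      | nil => rw [resolverColores, pvTreeCols]
      | cons color rest ihc =>
        rw [resolverColores, pvTreeCols, ← pv_V]
        by_cases hv : esValido nodo color asig d
        · rw [if_pos hv, if_pos hv]
          have hins_nd : (asig.insert nodo color).keys.Nodup :=
            PySem.Dict.nodup_keys_insert _ _ _ hnd
          have hins_sub : ∀ k ∈ (asig.insert nodo color).keys, k ∈ d.keys := by
            intro k hk
            rcases (PySem.Dict.mem_keys_insert _ _ _ _).mp hk with h1 | h2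
            · rw [h1]; exact hnodo_mem
            · exact hsub k h2
          have hins_sz : (asig.insert nodo color).size = asig.size + 1 := by
            rw [PySem.Dict.size_insert, hnodo_nc]; simp
          have hrec := ih (asig.insert nodo color) hins_nd hins_sub (by omega)
          have hfilt : d.keys.filter (fun n => !(asig.insert nodo color).contains n) = rem' := by
            have heq1 : d.keys.filter (fun n => !(asig.insert nodo color).contains n)
                = (d.keys.filter (fun n => !asig.contains n)).filter (fun n => !(n == nodo)) := by
              rw [List.filter_filter]
              apply List.filter_congr
              intro n _
              rw [PySem.Dict.contains_insert asig nodo n color]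
              cases n == nodo <;> cases asig.contains n <;> simp
            rw [heq1, hcons, List.filter_cons]
            simp only [beq_self_eq_true, Bool.not_true, Bool.false_eq_true, if_false]
            apply List.filter_eq_self.mpr
            intro a ha
            cases hb : a == nodo
            · simp
            · exact absurd (by rw [← eq_of_beq hb] at hnop; exact hnop) (by simp [ha])
          rw [hfilt] at hrec
          rw [← hrec]
          cases hres : resolverArbol d colores f (asig.insert nodo color) with
          | none => simp only []; exact ihc
          | some r =>
            have hr : r.size = d.size := pv_S d colores f _ r hres
            have : r.size ≠ 0 := by omega
            simp [this]
        · rw [if_neg hv, if_neg hv]; exact ihc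

theorem pv_O0 (d : PySem.Dict String (List String)) (colores cutset : List String) :
    ∀ combs, pvOuter d colores cutset combs = pvAux d colores cutset combs PySem.Dict.empty := by
  intro combs
  induction combs with
  | nil => rfl
  | cons comb rest ih =>
    rw [pvOuter, pvAux, ih]

theorem pv_O1 (d : PySem.Dict String (List String)) (colores : List String) (cs : List String)
    (asig : PySem.Dict String String) (l1 l2 : List (List String)) :
    pvAux d colores cs (l1 ++ l2) asig
      = (match pvAux d colores cs l1 asig with
         | some r => some r
         | none => pvAux d colores cs l2 asig) := by
  induction l1 with
  | nil => simp [pvAux]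
  | cons comb rest ih =>
    rw [List.cons_append, pvAux, pvAux]
    cases pvSeed d (cs.zip comb) asig with
    | none => simp only []; exact ih
    | some a =>
      simp only []
      cases resolverArbol d colores (d.size + 1) a with
      | none => simp only []; exact ih
      | some r =>
        by_cases hr : r.size = 0 <;> simp [hr, ih]

theorem pv_O2 (d : PySem.Dict String (List String)) (colores : List String)
    (c : String) (cs : List String) (col : String) (asig : PySem.Dict String String)
    (l : List (List String)) :
    pvAux d colores (c :: cs) (l.map (col :: ·)) asig
      = (if esValido c col asig d then pvAux d colores cs l (asig.insert c col) else none) := by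
  induction l with
  | nil => simp [pvAux]
  | cons comb rest ih =>
    rw [List.map_cons, pvAux]
    have hz : (c :: cs).zip (col :: comb) = (c, col) :: cs.zip comb := rfl
    rw [hz, pvSeed]
    by_cases hv : esValido c col asig d
    · rw [if_pos hv] at *
      rw [pvAux, ih, if_pos hv]
    · rw [if_neg hv] at *
      rw [ih, if_neg hv]

theorem pv_O3 (d : PySem.Dict String (List String)) (colores : List String)
    (hd : d.keys.Nodup) (hdsz : d.size ≠ 0) :
    ∀ (cs : List String) (asig : PySem.Dict String String),
      (∀ c ∈ cs, c ∈ d.keys) → asig.keys.Nodup → (∀ k ∈ asig.keys, k ∈ d.keys) →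
      pvAux d colores cs (pvProd colores cs.length) asig = pvSolveCutset d colores cs asig := by
  intro cs
  induction cs with
  | nil =>
    intro asig _ hnd hsub
    rw [List.length_nil, pvProd, pvAux, pvSolveCutset]
    have hz : (([] : List String)).zip ([] : List String) = [] := rfl
    rw [hz, pvSeed]
    simp only []
    rw [pv_T d colores hd (d.size + 1) asig hnd hsub (by omega)]
    cases hres : pvSolveTree d colores (d.keys.filter (fun n => !asig.contains n)) asig with
    | none => rw [pvAux]
    | some r =>
      have hr : r.size = d.size := by
        apply pv_S d colores (d.size + 1) asig r
        rw [pv_T d colores hd (d.size + 1) asig hnd hsub (by omega)]; exact hres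
      simp [show r.size ≠ 0 by omega]
  | cons c cs' ihcs =>
    intro asig hcs hnd hsub
    have hcmem : c ∈ d.keys := hcs c (List.mem_cons_self ..)
    rw [List.length_cons, pvProd, pvSolveCutset]
    suffices inner : ∀ cols : List String,
        pvAux d colores (c :: cs') (cols.flatMap fun col => (pvProd colores cs'.length).map (col :: ·)) asig
          = pvCutCols d colores c cs' cols asig from inner colores
    intro cols
    induction cols with
    | nil => rw [List.flatMap_nil, pvAux, pvCutCols]
    | cons col rest ihc =>
      rw [List.flatMap_cons, pv_O1, pv_O2, pvCutCols, ← pv_V]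
      by_cases hv : esValido c col asig d
      · rw [if_pos hv, if_pos hv]
        have hins_nd : (asig.insert c col).keys.Nodup := PySem.Dict.nodup_keys_insert _ _ _ hnd
        have hins_sub : ∀ k ∈ (asig.insert c col).keys, k ∈ d.keys := by
          intro k hk
          rcases (PySem.Dict.mem_keys_insert _ _ _ _).mp hk with h1 | h2
          · rw [h1]; exact hcmem
          · exact hsub k h2
        rw [ihcs (asig.insert c col) (fun x hx => hcs x (List.mem_cons_of_mem _ hx)) hins_nd hins_sub]
        cases pvSolveCutset d colores cs' (asig.insert c col) with
        | none => simp only []; exact ihc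
        | some r => simp only []
      · rw [if_neg hv, if_neg hv]
        exact ihc

-- pvToDict facts
theorem pv_F1 (grafo : List (String × List String)) : (pvToDict grafo).keys.Nodup := by
  exact PySem.Dict.nodup_keys_foldl_insert_key grafo (fun kv => kv.1) (fun _ kv => kv.2)
    PySem.Dict.empty (by rw [PySem.Dict.keys_empty]; exact List.nodup_nil)

theorem pv_F2 (grafo : List (String × List String)) (k : String) :
    k ∈ (pvToDict grafo).keys ↔ k ∈ grafo.map Prod.fst := by
  unfold pvToDict
  rw [PySem.Dict.keys_foldl_insert_key grafo (fun kv => kv.1) (fun _ kv => kv.2) PySem.Dict.empty]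
  rw [PySem.Dict.keys_empty]
  rw [PySem.Set.mem_update]
  simp

theorem pv_F3 (grafo : List (String × List String)) (h : grafo ≠ []) :
    (pvToDict grafo).size ≠ 0 := by
  rw [← pv_keys_length]
  intro hlen
  cases grafo with
  | nil => exact h rfl
  | cons kv rest =>
    have : kv.1 ∈ (pvToDict (kv :: rest)).keys := by
      rw [pv_F2]; simp
    rw [List.length_eq_zero_iff] at hlen
    rw [hlen] at this
    exact List.not_mem_nil this

-- the two entry points agree on every input admitted by Pre_ outside D_
theorem pv_main (grafo : List (String × List String)) (colores cutset : List String)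
    (hpre : Pre_cutset_conditioning grafo colores cutset) (hne : ¬ (grafo = [] ∧ cutset = [])) :
    cutset_conditioning grafo colores cutset = cutset_conditioning_alt grafo colores cutset := by
  simp only [cutset_conditioning, cutset_conditioning_alt]
  rw [pv_O0]
  suffices h : pvAux (pvToDict grafo) colores cutset (pvProd colores cutset.length) PySem.Dict.empty
      = pvSolveCutset (pvToDict grafo) colores cutset PySem.Dict.empty by rw [h]
  have hend : (PySem.Dict.empty : PySem.Dict String String).keys.Nodup := by
    rw [PySem.Dict.keys_empty]; exact List.nodup_nil
  have hesub : ∀ k ∈ (PySem.Dict.empty : PySem.Dict String String).keys, k ∈ (pvToDict grafo).keys := by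
    rw [PySem.Dict.keys_empty]; intro k hk; exact absurd hk (List.not_mem_nil)
  cases hcut : cutset with
  | nil =>
    have hg : grafo ≠ [] := by intro hg; exact hne ⟨hg, hcut⟩
    exact pv_O3 (pvToDict grafo) colores (pv_F1 grafo) (pv_F3 grafo hg) [] PySem.Dict.empty
      (by intro c hc; exact absurd hc (List.not_mem_nil)) hend hesub
  | cons c cs' =>
    by_cases hcol : colores = []
    · subst hcol
      rw [List.length_cons, pvProd, List.flatMap_nil, pvAux, pvSolveCutset, pvCutCols]
    · have hsubm : ∀ x ∈ cutset, x ∈ grafo.map Prod.fst := by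
        rcases hpre with h | h
        · exact h
        · exact absurd h hcol
      have hsubk : ∀ x ∈ c :: cs', x ∈ (pvToDict grafo).keys := by
        intro x hx; rw [pv_F2]; exact hsubm x (hcut ▸ hx)
      have hg : grafo ≠ [] := by
        intro hg
        have := hsubm c (hcut ▸ List.mem_cons_self ..)
        rw [hg] at this
        exact absurd this (List.not_mem_nil)
      exact pv_O3 (pvToDict grafo) colores (pv_F1 grafo) (pv_F3 grafo hg) (c :: cs')
        PySem.Dict.empty hsubk hend hesub

-- ===== VERDICT (by name: the statement is the Claim_ definition above) =====
theorem cutset_conditioning_spec : Claim_unchanged_cutset_conditioning := by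
  intro grafo colores cutset _ hpre hnd
  exact pv_main grafo colores cutset hpre (by unfold D_cutset_conditioning at hnd; exact hnd)
theorem cutset_conditioning_changed : Claim_changed_cutset_conditioning := by
  unfold Claim_changed_cutset_conditioning
  refine ⟨by decide, by decide, by decide, ?_, ?_, by decide⟩
  · show cutset_conditioning [] ["red"] [] = none
    simp [cutset_conditioning, pvToDict, pvOuter, pvProd, pvSeed, resolverArbol,
      PySem.Dict.size_empty]
  · show cutset_conditioning_alt [] ["red"] [] = some []
    simp [cutset_conditioning_alt, pvToDict, pvSolveCutset, pvSolveTree,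
      PySem.Dict.keys_empty]
    decide
theorem cutset_conditioning_tight : Claim_exact_cutset_conditioning := by
  intro grafo colores cutset _ _ hD
  obtain ⟨hg, hc⟩ := hD
  subst hg; subst hc
  have h1 : cutset_conditioning [] colores [] = none := by
    simp [cutset_conditioning, pvToDict, pvOuter, pvProd, pvSeed, resolverArbol,
      PySem.Dict.size_empty]
  have h2 : cutset_conditioning_alt [] colores [] = some [] := by
    simp [cutset_conditioning_alt, pvToDict, pvSolveCutset, pvSolveTree,
      PySem.Dict.keys_empty]
    decide
  rw [h1, h2]; simp
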